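-- pv_equiv track=rewrite | github.com/deividnf/Structured-Flow-Format | core/exporters/lanes_only_exporter.py | generate_k_values
-- ===== SOURCE A (Python) =====
-- EDGE_MAX_K = 8
--
-- def generate_k_values(edge_kind=None):
--     ks = [0]
--     for i in range(1, EDGE_MAX_K+1):
--         ks.append(+i)
--         ks.append(-i)
--
--     if edge_kind in ["true", "yes", "sim"]:
--         ks = [0] + [k for k in ks if k > 0] + [k for k in ks if k < 0]
--     elif edge_kind in ["false", "no", "não"]:
--         ks = [0] + [k for k in ks if k < 0] + [k for k in ks if k > 0]
--
--     seen = set()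
--     out = []
--     for k in ks:
--         if k not in seen:
--             seen.add(k)
--             out.append(k)
--     return out
-- ===== SOURCE B (Python) =====
-- EDGE_MAX_K = 8
--
-- def generate_k_values(edge_kind=None):
--     pos = list(range(1, EDGE_MAX_K + 1))
--     neg = [-i for i in pos]
--     if edge_kind in ["true", "yes", "sim"]:
--         return [0] + pos + neg
--     if edge_kind in ["false", "no", "não"]:
--         return [0] + neg + pos
--     return [0] + [x for p in zip(pos, neg) for x in p]
-- ===== Notes on version B (the rewrite author's own statement) =====
-- stated objective: simpler
-- what changed: B builds the positive and negative runs once and returns each branch's list directly (interleaving via zip for the default), dropping A's interleave-then-filter passes and the dead seen-set dedup loop, which never removes anything since all values are distinct.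
import Mathlib
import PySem

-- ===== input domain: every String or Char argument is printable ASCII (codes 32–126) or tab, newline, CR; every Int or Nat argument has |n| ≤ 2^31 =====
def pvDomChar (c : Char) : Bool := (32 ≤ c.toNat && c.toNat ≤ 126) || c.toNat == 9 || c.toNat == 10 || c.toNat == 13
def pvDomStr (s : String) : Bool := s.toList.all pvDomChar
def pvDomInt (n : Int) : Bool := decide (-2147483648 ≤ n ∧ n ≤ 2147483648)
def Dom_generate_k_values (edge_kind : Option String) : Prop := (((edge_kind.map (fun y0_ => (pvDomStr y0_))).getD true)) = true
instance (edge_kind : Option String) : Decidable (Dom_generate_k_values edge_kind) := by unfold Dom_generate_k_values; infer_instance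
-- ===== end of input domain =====

-- B replaces A's build-interleaved-then-filter-then-dedup pipeline by direct per-branch list construction (simpler); the dedup loop is dead since all values are distinct.

-- ===== PORT A =====
def pvA_EDGE_MAX_K : Int := 8

-- the build loop: for i in range(1, EDGE_MAX_K+1): ks.append(+i); ks.append(-i)
def pvA_build (ks0 : List Int) : List Int :=
  (PySem.List.pyRange 1 (pvA_EDGE_MAX_K + 1) 1).foldl (fun ks i => ks ++ [i] ++ [-i]) ks0

-- the dedup loop with the seen set
def pvA_dedup (ks : List Int) : List Int :=
  (ks.foldl (fun (st : PySem.Set Int × List Int) k =>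
      if (PySem.Set.contains st.1 k) = false then (PySem.Set.add st.1 k, st.2 ++ [k]) else st) (PySem.Set.ofList [], [])).2

def generate_k_values (edge_kind : Option String) : List Int :=
  let ks := pvA_build [0]
  let ks :=
    if edge_kind ∈ [some "true", some "yes", some "sim"] then
      [0] ++ ks.filter (fun k => decide (k > 0)) ++ ks.filter (fun k => decide (k < 0))
    else if edge_kind ∈ [some "false", some "no", some "não"] then
      [0] ++ ks.filter (fun k => decide (k < 0)) ++ ks.filter (fun k => decide (k > 0))
    else ks
  pvA_dedup ks

-- ===== PORT B =====
def generate_k_values_alt (edge_kind : Option String) : List Int :=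
  let pos := PySem.List.pyRange 1 (((8 : Int) + 1)) 1
  let neg := pos.map (fun i => -i)
  if edge_kind ∈ [some "true", some "yes", some "sim"] then
    [0] ++ pos ++ neg
  else if edge_kind ∈ [some "false", some "no", some "não"] then
    [0] ++ neg ++ pos
  else
    [0] ++ (pos.zip neg).flatMap (fun p => [p.1, p.2])

-- ===== PRECONDITION & SPEC =====
def Spec_generate_k_values (edge_kind : Option String) (out : List Int) : Prop := out = generate_k_values_alt edge_kind
instance (edge_kind : Option String) (out : List Int) : Decidable (Spec_generate_k_values edge_kind out) := by unfold Spec_generate_k_values; infer_instance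

-- ===== CLAIM (what is proved, stated in full; the proofs are below) =====
def Claim_equal_generate_k_values : Prop := ∀ (edge_kind : Option String), Dom_generate_k_values edge_kind → Spec_generate_k_values edge_kind (generate_k_values edge_kind)

-- ===== LEMMAS AND PROOFS =====

-- Once the branch is fixed, both sides are closed computations; case on the two membership tests.
theorem generate_k_values_branches (edge_kind : Option String) :
    generate_k_values edge_kind = generate_k_values_alt edge_kind := by
  unfold generate_k_values generate_k_values_alt
  split_ifs <;> decide

-- ===== VERDICT (by name: the statement is the Claim_ definition above) =====
theorem generate_k_values_spec : Claim_equal_generate_k_values := by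
  intro ek _
  exact generate_k_values_branches ek
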